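-- pv_equiv track=rewrite | github.com/Rachel-3/2024-Algorithm-Study | chaerim/Programmers/Level_1/Lv1_과일_장수.py | solution
-- ===== SOURCE A (Python) =====
-- def solution(k, m, score):
--     answer = 0
--     score = sorted(score, reverse=True)
--
--     score_list = []
--     for i in range(0, len(score), m):
--         score_list.append(score[i:i+m])
--
--     for i in score_list:
--         if len(i) == m:
--             answer += min(i) * m
--
--     return answer
-- ===== SOURCE B (Python) =====
-- def solution(k, m, score):
--     s = sorted(score)
--     total = 0
--     for i in range(len(s) % m, len(s), m):
--         total += s[i]
--     return total * m
-- ===== Notes on version B (the rewrite author's own statement) =====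
-- stated objective: alternative
-- what changed: B sorts ASCENDING (no reverse), never forms boxes and never calls min(): it walks the index arithmetic progression range(len%m, len, m) of box-minimum positions, accumulates those elements, and multiplies the accumulated sum by m once at the end.
import Mathlib
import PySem

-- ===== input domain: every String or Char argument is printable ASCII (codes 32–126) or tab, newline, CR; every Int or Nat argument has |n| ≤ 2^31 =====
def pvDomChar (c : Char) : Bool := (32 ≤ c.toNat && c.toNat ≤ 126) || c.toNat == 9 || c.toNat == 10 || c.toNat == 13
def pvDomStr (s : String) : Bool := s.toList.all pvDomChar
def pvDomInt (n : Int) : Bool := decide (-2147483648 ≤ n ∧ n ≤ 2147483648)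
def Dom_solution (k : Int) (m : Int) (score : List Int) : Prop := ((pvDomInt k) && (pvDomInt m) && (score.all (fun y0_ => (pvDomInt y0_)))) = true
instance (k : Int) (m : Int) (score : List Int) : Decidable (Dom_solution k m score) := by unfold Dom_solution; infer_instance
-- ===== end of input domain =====

-- B sorts ascending (no reverse), builds no boxes and calls no min(): it sums the elements
-- at the stride positions range(len%m, len, m) — the box minima — and multiplies by m once.

-- ===== PORT A =====
def solution (k : Int) (m : Int) (score : List Int) : Int :=
  let answer : Int := 0
  let s := PySem.List.sorted score (fun x => x) true
  let score_list : List (List Int) :=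
    (PySem.List.pyRange 0 (s.length : Int) m).foldl
      (fun acc i => acc ++ [PySem.List.slice s (some i) (some (i + m))]) []
  -- min(i) is only evaluated when len(i) == m > 0, so the chunk is nonempty; .getD 0 is never the raising case
  score_list.foldl
    (fun answer i => if (i.length : Int) = m
      then answer + ((PySem.List.min? i (fun x => x)).getD 0) * m
      else answer) answer

-- ===== PORT B =====
def solution_alt (k : Int) (m : Int) (score : List Int) : Int :=
  let s := PySem.List.sorted score (fun x => x) false
  -- s[i] is in range for every i produced by the stride range; .getD 0 is never the raising case
  let total :=
    (PySem.List.pyRange (PySem.Int.mod (s.length : Int) m) (s.length : Int) m).foldl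
      (fun total i => total + (PySem.List.pyGet? s i).getD 0) 0
  total * m

-- ===== PRECONDITION & SPEC =====
-- Pre_ excludes exactly m = 0, where A raises ValueError (range step 0); B raises ZeroDivisionError there.
def Pre_solution (k : Int) (m : Int) (score : List Int) : Prop := m ≠ 0
instance (k : Int) (m : Int) (score : List Int) : Decidable (Pre_solution k m score) := by unfold Pre_solution; infer_instance
def pvWitness_solution : Int × Int × List Int := (4, 3, [1, 2, 3, 1, 2, 3, 1])

def Spec_solution (k : Int) (m : Int) (score : List Int) (out : Int) : Prop := out = solution_alt k m score
instance (k : Int) (m : Int) (score : List Int) (out : Int) : Decidable (Spec_solution k m score out) := by unfold Spec_solution; infer_instance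

-- ===== CLAIM (what is proved, stated in full; the proofs are below) =====
def Claim_equal_solution : Prop := ∀ (k : Int) (m : Int) (score : List Int), Dom_solution k m score → Pre_solution k m score → Spec_solution k m score (solution k m score)

-- ===== LEMMAS AND PROOFS =====

lemma min_chunk (s : List Int) (hs : List.Pairwise (fun a b : Int => b ≤ a) s)
    (j mN : Nat) (hmN : 0 < mN) (hle : j + mN ≤ s.length) :
    (PySem.List.min? ((s.drop j).take mN) (fun x => x)).getD 0
      = s[j + (mN - 1)]'(by omega) := by
  set ck := (s.drop j).take mN with hck
  have hlen : ck.length = mN := by simp [hck]; omega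
  have hcelem : ∀ (p : Nat) (hp : p < mN), (ck[p]'(by omega)) = s[j + p]'(by omega) := by
    intro p hp
    simp [hck, List.getElem_take, List.getElem_drop]
  cases hmin : PySem.List.min? ck (fun x => x) with
  | none =>
      exfalso
      have := (PySem.List.min?_eq_none_iff ck (fun x => x)).mp hmin
      rw [this] at hlen; simp at hlen; omega
  | some v =>
      have hvmem := PySem.List.min?_mem hmin
      have hvmin := PySem.List.min?_isMin hmin
      have h2 : v ≤ s[j + (mN - 1)]'(by omega) := by
        have hm := hvmin (ck[mN - 1]'(by omega)) (List.getElem_mem _)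
        rw [hcelem (mN - 1) (by omega)] at hm
        simpa using hm
      have h3 : s[j + (mN - 1)]'(by omega) ≤ v := by
        obtain ⟨p, hp, hpv⟩ := List.mem_iff_getElem.mp hvmem
        have hp' : p < mN := by omega
        rw [hcelem p hp'] at hpv
        rcases eq_or_lt_of_le (by omega : p ≤ mN - 1) with he | hlt
        · subst he; exact hpv.le
        · have := List.pairwise_iff_getElem.mp hs (j + p) (j + (mN - 1))
            (by omega) (by omega) (by omega)
          rw [hpv] at this; exact this
      simp [le_antisymm h2 h3]

lemma loopA_as_sum (m : Int) (cs : List (List Int)) :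
    cs.foldl (fun answer i => if (i.length : Int) = m
        then answer + ((PySem.List.min? i (fun x => x)).getD 0) * m else answer) 0
    = (cs.map (fun i => if (i.length : Int) = m
        then ((PySem.List.min? i (fun x => x)).getD 0) * m else 0)).sum := by
  have h : (fun (answer : Int) (i : List Int) => if (i.length : Int) = m
        then answer + ((PySem.List.min? i (fun x => x)).getD 0) * m else answer)
      = fun answer i => answer + (if (i.length : Int) = m
        then ((PySem.List.min? i (fun x => x)).getD 0) * m else 0) := by
    funext a i; split <;> simp
  rw [h, PySem.List.foldl_add]; simp

-- one full box: A's grouped-min term equals the boundary element of the box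
lemma term_eq (mN : Nat) (hmN : 0 < mN) (s : List Int)
    (hs : List.Pairwise (fun a b : Int => b ≤ a) s) (k : Nat) (hk : k < s.length / mN) :
    (if ((PySem.List.slice s (some ((0:Int) + ↑mN * ↑k)) (some ((0:Int) + ↑mN * ↑k + ↑mN))).length : Int) = (mN : Int)
      then ((PySem.List.min? (PySem.List.slice s (some ((0:Int) + ↑mN * ↑k)) (some ((0:Int) + ↑mN * ↑k + ↑mN))) (fun x => x)).getD 0) * ↑mN else 0)
    = (s[mN * k + (mN - 1)]?).getD 0 * ↑mN := by
  have h1 : (k + 1) * mN ≤ (s.length / mN) * mN := Nat.mul_le_mul_right _ (by omega)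
  have h2 : (s.length / mN) * mN ≤ s.length := Nat.div_mul_le_self _ _
  have h3 : (k + 1) * mN = mN * k + mN := by ring
  have hjm : mN * k + mN ≤ s.length := by omega
  have hcast : ((0:Int) + ↑mN * (k:Int)) = ((mN * k : Nat) : Int) := by push_cast; ring
  rw [hcast, PySem.List.slice_natCast_add s (mN * k) mN]
  have hlen : (List.take mN (List.drop (mN * k) s)).length = mN := by
    simp; omega
  rw [if_pos (by exact_mod_cast congrArg (Nat.cast : Nat → Int) hlen)]
  rw [min_chunk s hs (mN * k) mN hmN hjm,
    List.getElem?_eq_getElem (by omega : mN * k + (mN - 1) < s.length), Option.getD_some]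

lemma pyRange_neg_empty (a n m : Int) (han : a ≤ n) (hm : m < 0) :
    PySem.List.pyRange a n m = [] := by
  simp only [PySem.List.pyRange]
  have h1 : ¬ m = 0 := by omega
  have h2 : ¬ 0 < m := by omega
  have h3 : ¬ n < a := by omega
  simp [h1, h2, h3]

lemma last_term (mN : Nat) (hmN : 0 < mN) (s : List Int) (hr : 0 < s.length % mN) :
    (if ((PySem.List.slice s (some ((0:Int) + ↑mN * ↑(s.length / mN))) (some ((0:Int) + ↑mN * ↑(s.length / mN) + ↑mN))).length : Int) = (mN : Int)
      then ((PySem.List.min? (PySem.List.slice s (some ((0:Int) + ↑mN * ↑(s.length / mN))) (some ((0:Int) + ↑mN * ↑(s.length / mN) + ↑mN))) (fun x => x)).getD 0) * ↑mN else 0)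
    = 0 := by
  have hdm := Nat.div_add_mod s.length mN
  have hlt := Nat.mod_lt s.length hmN
  have hcast : ((0:Int) + ↑mN * ((s.length / mN : Nat) : Int)) = ((mN * (s.length / mN) : Nat) : Int) := by
    push_cast; ring
  rw [hcast, PySem.List.slice_natCast_add s (mN * (s.length / mN)) mN]
  have hlen : (List.take mN (List.drop (mN * (s.length / mN)) s)).length = s.length % mN := by
    simp; omega
  rw [hlen, if_neg (by exact_mod_cast hlt.ne)]

lemma cnt_eq_full (n mN : Nat) (hmN : 0 < mN) (hr : n % mN = 0) :
    (n + mN - 1) / mN = n / mN := by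
  have hdm := Nat.div_add_mod n mN
  have h : n + mN - 1 = mN * (n / mN) + (mN - 1) := by omega
  rw [h, Nat.mul_add_div hmN,
    show (mN - 1) / mN = 0 from Nat.div_eq_of_lt (by omega), Nat.add_zero]

lemma cnt_eq_full_succ (n mN : Nat) (hmN : 0 < mN) (hr : 0 < n % mN) :
    (n + mN - 1) / mN = n / mN + 1 := by
  have hdm := Nat.div_add_mod n mN
  have hlt := Nat.mod_lt n hmN
  have h : n + mN - 1 = mN * (n / mN) + (n % mN + mN - 1) := by omega
  rw [h, Nat.mul_add_div hmN,
    show (n % mN + mN - 1) / mN = 1 from Nat.div_eq_of_lt_le (by omega) (by omega)]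

-- A's whole loop as a sum of boundary elements of the descending-sorted list
lemma A_as_sum (mN : Nat) (hmN : 0 < mN) (s : List Int)
    (hs : List.Pairwise (fun a b : Int => b ≤ a) s) :
    ((PySem.List.pyRange 0 (s.length : Int) (mN : Int)).foldl
        (fun acc i => acc ++ [PySem.List.slice s (some i) (some (i + (mN:Int)))]) ([] : List (List Int))).foldl
      (fun answer i => if (i.length : Int) = (mN:Int)
        then answer + ((PySem.List.min? i (fun x => x)).getD 0) * (mN:Int) else answer) 0
    = ((List.range (s.length / mN)).map
        (fun j => (s[mN * j + (mN - 1)]?).getD 0 * (mN : Int))).sum := by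
  have hpos : (0:Int) < (mN:Int) := by exact_mod_cast hmN
  rw [PySem.List.foldl_append_singleton_eq_map, List.nil_append, loopA_as_sum,
    PySem.List.pyRange_of_pos 0 (s.length : Int) hpos]
  simp only [List.map_map]
  rcases Nat.eq_zero_or_pos s.length with h0 | hn0
  · simp [h0]
  · have hcnt : (if (0:Int) < (s.length:Int) then (((s.length:Int) - 0 + ↑mN - 1) / (mN:Int)).toNat else 0)
        = (s.length + mN - 1) / mN := by
      rw [if_pos (by exact_mod_cast hn0)]
      have h : ((s.length:Int) - 0 + ↑mN - 1) = ((s.length + mN - 1 : Nat) : Int) := by omega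
      rw [h]
      rw [show ((s.length + mN - 1 : Nat) : Int) / (mN : Int) = (((s.length + mN - 1) / mN : Nat) : Int) from
        (Int.natCast_div _ _).symm]
      exact Int.toNat_natCast _
    rw [hcnt]
    rcases Nat.eq_zero_or_pos (s.length % mN) with hr | hr
    · rw [cnt_eq_full s.length mN hmN hr]
      refine congrArg List.sum (List.map_congr_left ?_)
      intro k hk
      simp only [Function.comp_apply]
      exact term_eq mN hmN s hs k (List.mem_range.mp hk)
    · rw [cnt_eq_full_succ s.length mN hmN hr]
      rw [List.range_succ, List.map_append, List.sum_append]
      simp only [List.map_cons, List.map_nil, Function.comp_apply, List.sum_cons,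
        List.sum_nil, add_zero]
      rw [last_term mN hmN s hr, add_zero]
      refine congrArg List.sum (List.map_congr_left ?_)
      intro k hk
      simp only [Function.comp_apply]
      exact term_eq mN hmN s hs k (List.mem_range.mp hk)

-- B's stride walk as a sum of elements of the ascending-sorted list
lemma B_as_sum (mN : Nat) (hmN : 0 < mN) (a : List Int) :
    (PySem.List.pyRange (PySem.Int.mod (a.length : Int) (mN:Int)) (a.length : Int) (mN:Int)).foldl
      (fun total i => total + (PySem.List.pyGet? a i).getD 0) 0
    = ((List.range (a.length / mN)).map
        (fun j => (a[a.length % mN + mN * j]?).getD 0)).sum := by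
  have hpos : (0:Int) < (mN:Int) := by exact_mod_cast hmN
  have hdm := Nat.div_add_mod a.length mN
  have hmlt := Nat.mod_lt a.length hmN
  set Q := a.length / mN with hQ
  set R := a.length % mN with hR
  rw [show PySem.Int.mod (a.length : Int) (mN:Int) = ((R : Nat) : Int) from
    PySem.Int.mod_natCast a.length mN]
  rw [PySem.List.pyRange_of_pos _ _ hpos, PySem.List.foldl_add]
  rcases Nat.lt_or_ge R a.length with hlt | hge
  · have hcnt : (if ((R : Nat) : Int) < (a.length : Int)
        then (((a.length:Int) - ((R : Nat):Int) + ↑mN - 1) / (mN:Int)).toNat else 0)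
        = Q := by
      rw [if_pos (by exact_mod_cast hlt)]
      have h : ((a.length:Int) - ((R : Nat):Int) + ↑mN - 1)
          = ((a.length - R + mN - 1 : Nat) : Int) := by omega
      rw [h, show ((a.length - R + mN - 1 : Nat) : Int) / (mN : Int)
          = (((a.length - R + mN - 1) / mN : Nat) : Int) from (Int.natCast_div _ _).symm]
      rw [show (a.length - R + mN - 1) / mN = Q by
        rw [show a.length - R + mN - 1 = mN * Q + (mN - 1) by omega,
          Nat.mul_add_div hmN, Nat.div_eq_of_lt (show mN - 1 < mN by omega), Nat.add_zero]]
      exact Int.toNat_natCast _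
    rw [hcnt, zero_add, List.map_map]
    refine congrArg List.sum (List.map_congr_left ?_)
    intro j hj
    simp only [Function.comp_apply]
    have hidx : ((R : Nat) : Int) + (mN:Int) * (j:Int)
        = ((R + mN * j : Nat) : Int) := by push_cast; ring
    rw [hidx, PySem.List.pyGet?_natCast]
  · -- R = a.length : the stride range is empty and full = 0
    have h0 : R = a.length := le_antisymm (hR ▸ Nat.mod_le _ _) hge
    have hfull : Q = 0 := by rw [hQ]; exact Nat.div_eq_of_lt (by omega)
    rw [if_neg (by exact_mod_cast Nat.not_lt.mpr hge), hfull]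
    simp

-- summing a range backwards gives the same sum
lemma list_reflect (n : Nat) (f : Nat → Int) :
    ((List.range n).map (fun j => f (n - 1 - j))).sum = ((List.range n).map f).sum := by
  induction n generalizing f with
  | zero => simp
  | succ n ih =>
      conv_lhs => rw [List.range_succ_eq_map]
      conv_rhs => rw [List.range_succ]
      rw [List.map_cons, List.map_map, List.sum_cons, List.map_append, List.sum_append]
      have h : ((List.range n).map ((fun j => f (n + 1 - 1 - j)) ∘ (· + 1))).sum
          = ((List.range n).map (fun j => f (n - 1 - j))).sum := by
        refine congrArg List.sum (List.map_congr_left ?_)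
        intro j hj
        have := List.mem_range.mp hj
        simp only [Function.comp_apply]
        congr 1; omega
      rw [h, ih f]
      simp [add_comm]

-- the descending sort is the reverse of the ascending sort (as value lists)
lemma desc_eq_reverse_asc (score : List Int) :
    PySem.List.sorted score (fun x => x) true
      = (PySem.List.sorted score (fun x => x) false).reverse := by
  have hd : (PySem.List.sorted score (fun x => x) true).Pairwise (fun a b : Int => b ≤ a) :=
    PySem.List.sorted_pairwise_rev score (fun x => x)
  have ha : (PySem.List.sorted score (fun x => x) false).Pairwise (fun a b : Int => a ≤ b) :=
    PySem.List.sorted_pairwise score (fun x => x)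
  have har : ((PySem.List.sorted score (fun x => x) false).reverse).Pairwise (fun a b : Int => b ≤ a) :=
    (List.pairwise_reverse).mpr ha
  have hperm : (PySem.List.sorted score (fun x => x) true).Perm
      ((PySem.List.sorted score (fun x => x) false).reverse) :=
    (PySem.List.sorted_perm score (fun x => x) true).trans
      ((PySem.List.sorted_perm score (fun x => x) false).symm.trans
        (List.reverse_perm _).symm)
  exact hperm.eq_of_pairwise (fun a b _ _ h1 h2 => le_antisymm h2 h1) hd har

lemma main_eq (m : Int) (hm : m ≠ 0) (score : List Int) :
    ((PySem.List.pyRange 0 ((PySem.List.sorted score (fun x => x) true).length : Int) m).foldl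
        (fun acc i => acc ++ [PySem.List.slice (PySem.List.sorted score (fun x => x) true) (some i) (some (i + m))]) ([] : List (List Int))).foldl
      (fun answer i => if (i.length : Int) = m
        then answer + ((PySem.List.min? i (fun x => x)).getD 0) * m else answer) 0
    = ((PySem.List.pyRange (PySem.Int.mod ((PySem.List.sorted score (fun x => x) false).length : Int) m)
          ((PySem.List.sorted score (fun x => x) false).length : Int) m).foldl
        (fun total i => total + (PySem.List.pyGet? (PySem.List.sorted score (fun x => x) false) i).getD 0) 0) * m := by
  rcases lt_or_gt_of_ne hm with hneg | hpos
  · rw [pyRange_neg_empty 0 _ m (Int.natCast_nonneg _) hneg]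
    have hble : PySem.Int.mod ((PySem.List.sorted score (fun x => x) false).length : Int) m
        ≤ ((PySem.List.sorted score (fun x => x) false).length : Int) := by
      have hb := PySem.Int.mod_neg_bounds ((PySem.List.sorted score (fun x => x) false).length : Int) hneg
      have hn0 : (0:Int) ≤ ((PySem.List.sorted score (fun x => x) false).length : Int) :=
        Int.natCast_nonneg _
      omega
    rw [pyRange_neg_empty _ _ m hble hneg]
    simp
  · obtain ⟨mN, rfl⟩ := Int.eq_ofNat_of_zero_le hpos.le
    have hmN : 0 < mN := by exact_mod_cast hpos
    set a := PySem.List.sorted score (fun x => x) false with hadef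
    set d := PySem.List.sorted score (fun x => x) true with hddef
    have hda : d = a.reverse := desc_eq_reverse_asc score
    have hlen : d.length = a.length := by rw [hda]; simp
    have hds : List.Pairwise (fun x y : Int => y ≤ x) d :=
      PySem.List.sorted_pairwise_rev score (fun x => x)
    rw [A_as_sum mN hmN d hds, B_as_sum mN hmN a]
    rw [← List.sum_map_mul_right]
    rw [hlen]
    set n := a.length with hn
    have hdm := Nat.div_add_mod n mN
    set full := n / mN with hfull
    set r := n % mN with hr
    have hterm : ∀ j ∈ List.range full,
        (d[mN * j + (mN - 1)]?).getD 0 * ((mN:Nat) : Int)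
          = (fun j => (a[r + mN * j]?).getD 0 * ((mN:Nat) : Int)) (full - 1 - j) := by
      intro j hj
      have hjf := List.mem_range.mp hj
      have h1 : (j + 1) * mN ≤ full * mN := Nat.mul_le_mul_right _ (by omega)
      have h1' : (j + 1) * mN = mN * j + mN := by ring
      have h2' : full * mN ≤ n := by
        have := Nat.div_mul_le_self n mN
        omega
      have hi : mN * j + (mN - 1) < n := by omega
      have hrev : (d[mN * j + (mN - 1)]?) = a[n - 1 - (mN * j + (mN - 1))]? := by
        rw [hda, List.getElem?_reverse (by rw [← hn]; exact hi)]
      have hix : n - 1 - (mN * j + (mN - 1)) = r + mN * (full - 1 - j) := by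
        have h3 : mN * (full - 1 - j) + mN * (j + 1) = mN * full := by
          rw [← Nat.mul_add]
          congr 1
          omega
        have h4 : mN * full = full * mN := Nat.mul_comm _ _
        have h5 : mN * (j + 1) = mN * j + mN := by ring
        omega
      rw [hrev, hix]
    rw [List.map_congr_left hterm]
    exact list_reflect full (fun j => (a[r + mN * j]?).getD 0 * ((mN:Nat) : Int))

-- ===== VERDICT (by name: the statement is the Claim_ definition above) =====
theorem solution_spec : Claim_equal_solution := by
  intro k m score _ hpre
  show solution k m score = solution_alt k m score
  exact main_eq m hpre score
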